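-- pv_equiv track=rewrite | github.com/NDSTEEL/Agentic-Studio-Voice | backend/src/services/web_crawler_service.py | prioritize_crawling_urls
-- ===== SOURCE A (Python) =====
-- from typing import Dict, List, Any, Optional
--
-- def prioritize_crawling_urls(urls: List[str]) -> List[str]:
--     """Prioritize URLs for crawling based on likely content importance"""
--     priority_keywords = {
--         'about': 10,
--         'company': 9,
--         'contact': 8,
--         'products': 7,
--         'services': 7,
--         'pricing': 6,
--         'home': 5
--     }
--
--     def get_priority(url: str) -> int:
--         url_lower = url.lower()
--         for keyword, priority in priority_keywords.items():
--             if keyword in url_lower: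
--                 return priority
--         return 1  # Default priority
--
--     return sorted(urls, key=get_priority, reverse=True)
-- ===== SOURCE B (Python) =====
-- from typing import List
--
-- def prioritize_crawling_urls(urls: List[str]) -> List[str]:
--     """Prioritize URLs for crawling based on likely content importance.
--
--     Bucket (counting-sort) version: compute each URL's priority once, then
--     emit buckets for the fixed descending priority values instead of sorting.
--     """
--     priority_keywords = [
--         ('about', 10),
--         ('company', 9),
--         ('contact', 8),
--         ('products', 7),
--         ('services', 7),
--         ('pricing', 6),
--         ('home', 5),
--     ]
--
--     def get_priority(url: str) -> int:
--         url_lower = url.lower()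
--         for keyword, priority in priority_keywords:
--             if keyword in url_lower:
--                 return priority
--         return 1
--
--     prioritized = [(get_priority(u), u) for u in urls]
--     result: List[str] = []
--     for p in (10, 9, 8, 7, 6, 5, 1):
--         result += [u for (q, u) in prioritized if q == p]
--     return result
-- ===== Notes on version B (the rewrite author's own statement) =====
-- stated objective: alternative
-- what changed: Replaces the comparison sort (sorted with key, reverse=True) by a bucket/counting sort: priorities are computed once, URLs are emitted by concatenating the buckets of the seven possible priority values in descending order, preserving input order within each bucket.
import Mathlib
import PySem

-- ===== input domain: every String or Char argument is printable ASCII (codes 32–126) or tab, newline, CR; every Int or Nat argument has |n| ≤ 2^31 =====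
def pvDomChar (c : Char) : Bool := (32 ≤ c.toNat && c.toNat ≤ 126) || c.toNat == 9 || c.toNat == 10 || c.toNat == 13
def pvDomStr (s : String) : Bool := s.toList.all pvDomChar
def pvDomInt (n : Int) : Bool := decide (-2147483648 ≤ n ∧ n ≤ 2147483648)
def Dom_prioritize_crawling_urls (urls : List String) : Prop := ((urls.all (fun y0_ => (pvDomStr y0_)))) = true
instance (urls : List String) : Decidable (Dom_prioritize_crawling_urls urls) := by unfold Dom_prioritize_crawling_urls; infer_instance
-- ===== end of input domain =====

-- B replaces A's comparison sort by a bucket/counting pass over the seven fixed priority values (alternative algorithm, same result).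


-- ===== PORT A =====
-- get_priority: iterate the priority_keywords dict in insertion order, return on first hit
def pvGetPriorityA (url : String) : Int :=
  let url_lower := PySem.Str.lower url
  if PySem.Str.isIn "about" url_lower then 10
  else if PySem.Str.isIn "company" url_lower then 9
  else if PySem.Str.isIn "contact" url_lower then 8
  else if PySem.Str.isIn "products" url_lower then 7
  else if PySem.Str.isIn "services" url_lower then 7
  else if PySem.Str.isIn "pricing" url_lower then 6
  else if PySem.Str.isIn "home" url_lower then 5
  else 1

def prioritize_crawling_urls (urls : List String) : List String :=
  PySem.List.sorted urls pvGetPriorityA true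

-- ===== PORT B =====
-- B's get_priority: a loop over the (keyword, priority) pair list
def pvScanKeywords : List (String × Int) → String → Int
  | [], _ => 1
  | (kw, pr) :: rest, ul => if PySem.Str.isIn kw ul then pr else pvScanKeywords rest ul

def pvGetPriorityB (url : String) : Int :=
  pvScanKeywords [("about", 10), ("company", 9), ("contact", 8), ("products", 7),
                  ("services", 7), ("pricing", 6), ("home", 5)] (PySem.Str.lower url)

def prioritize_crawling_urls_alt (urls : List String) : List String :=
  let prioritized := urls.map (fun u => (pvGetPriorityB u, u))
  ([10, 9, 8, 7, 6, 5, 1] : List Int).foldl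
    (fun result p => result ++ (prioritized.filter (fun q => q.1 == p)).map Prod.snd) []

-- ===== PRECONDITION & SPEC =====
def Spec_prioritize_crawling_urls (urls : List String) (out : List String) : Prop := out = prioritize_crawling_urls_alt urls
instance (urls : List String) (out : List String) : Decidable (Spec_prioritize_crawling_urls urls out) := by unfold Spec_prioritize_crawling_urls; infer_instance

-- ===== CLAIM (what is proved, stated in full; the proofs are below) =====
def Claim_equal_prioritize_crawling_urls : Prop := ∀ (urls : List String), Dom_prioritize_crawling_urls urls → Spec_prioritize_crawling_urls urls (prioritize_crawling_urls urls)

-- ===== LEMMAS AND PROOFS =====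

-- the two priority functions agree
theorem getPriority_eq (u : String) : pvGetPriorityB u = pvGetPriorityA u := by
  simp [pvGetPriorityA, pvGetPriorityB, pvScanKeywords]

-- the priority function only takes the seven bucket values
theorem getPriority_mem (u : String) : pvGetPriorityA u ∈ ([10, 9, 8, 7, 6, 5, 1] : List Int) := by
  unfold pvGetPriorityA
  dsimp only
  split_ifs <;> simp

-- insertBy skips past a prefix none of whose elements x goes before
theorem insertBy_append_of_not_before {α : Type} (bef : α → α → Bool) (x : α)
    (l1 l2 : List α) (h : ∀ y ∈ l1, bef x y = false) :
    PySem.List.insertBy bef x (l1 ++ l2) = l1 ++ PySem.List.insertBy bef x l2 := by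
  induction l1 with
  | nil => simp
  | cons y ys ih =>
    have hy := h y (by simp)
    simp [PySem.List.insertBy, hy]
    exact ih (fun z hz => h z (by simp [hz]))

-- insertBy prepends when x goes before everything
theorem insertBy_of_forall_before {α : Type} (bef : α → α → Bool) (x : α)
    (l : List α) (h : ∀ y ∈ l, bef x y = true) :
    PySem.List.insertBy bef x l = x :: l := by
  cases l with
  | nil => simp [PySem.List.insertBy]
  | cons y ys => simp [PySem.List.insertBy, h y (by simp)]

-- inserting x into a descending bucket concatenation appends x at the end of its own bucket
theorem insertBy_flatMap (key : String → Int) (x : String) (ps : List Int)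
    (hps : ps.Pairwise (· > ·)) (hmem : key x ∈ ps) (B : Int → List String)
    (hB : ∀ p ∈ ps, ∀ u ∈ B p, key u = p) :
    PySem.List.insertBy (fun a b => decide (key b < key a)) x (ps.flatMap B) =
      ps.flatMap (fun p => B p ++ if key x = p then [x] else []) := by
  induction ps with
  | nil => simp at hmem
  | cons p ps ih =>
    rw [List.pairwise_cons] at hps
    obtain ⟨hpgt, hps'⟩ := hps
    by_cases hx : key x = p
    · -- x belongs to the head bucket: skip B p, then prepend to the (strictly smaller) rest
      have h1 : ∀ y ∈ B p, (fun a b => decide (key b < key a)) x y = false := by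
        intro y hy
        have := hB p (by simp) y hy
        simp [this, hx]
      have h2 : ∀ y ∈ ps.flatMap B, (fun a b => decide (key b < key a)) x y = true := by
        intro y hy
        rw [List.mem_flatMap] at hy
        obtain ⟨q, hq, hyq⟩ := hy
        have := hB q (by simp [hq]) y hyq
        have hlt := hpgt q hq
        simp [this, hx]
        omega
      have hrest : ps.flatMap (fun q => B q ++ if key x = q then [x] else []) = ps.flatMap B := by
        apply List.flatMap_congr
        intro q hq
        have := hpgt q hq
        have hne : key x ≠ q := by omega
        simp [hne]
      rw [List.flatMap_cons, List.flatMap_cons,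
        insertBy_append_of_not_before _ _ _ _ h1,
        insertBy_of_forall_before _ _ _ h2, hrest]
      simp [hx]
    · -- x belongs to a later bucket: skip B p and recurse
      have hxm : key x ∈ ps := by
        rcases List.mem_cons.mp hmem with h | h
        · exact absurd h hx
        · exact h
      have hxlt : key x < p := hpgt _ hxm
      have h1 : ∀ y ∈ B p, (fun a b => decide (key b < key a)) x y = false := by
        intro y hy
        have := hB p (by simp) y hy
        simp [this]
        omega
      rw [List.flatMap_cons, List.flatMap_cons,
        insertBy_append_of_not_before _ _ _ _ h1,
        ih hps' hxm (fun q hq => hB q (by simp [hq]))]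
      simp [hx]

-- B's filtered buckets, expressed directly on urls
theorem bucket_eq (urls : List String) (p : Int) :
    ((urls.map (fun u => (pvGetPriorityB u, u))).filter (fun q => q.1 == p)).map Prod.snd =
      urls.filter (fun u => pvGetPriorityA u == p) := by
  have hm : urls.map (fun u => (pvGetPriorityB u, u)) = urls.map (fun u => (pvGetPriorityA u, u)) := by
    simp [getPriority_eq]
  rw [hm]; clear hm
  induction urls with
  | nil => rfl
  | cons u us ih =>
    by_cases h : pvGetPriorityA u = p <;> simp [h, ih]

-- the main correspondence: the stable reverse insertion sort equals the bucket concatenation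
theorem sorted_eq_flatMap (urls : List String) :
    PySem.List.sorted urls pvGetPriorityA true =
      ([10, 9, 8, 7, 6, 5, 1] : List Int).flatMap
        (fun p => urls.filter (fun u => pvGetPriorityA u == p)) := by
  rw [PySem.List.sorted_rev_eq_foldl_insertBy]
  induction urls using List.reverseRecOn with
  | nil => rfl
  | append_singleton us x ih =>
    rw [List.foldl_append, List.foldl_cons, List.foldl_nil, ih,
      insertBy_flatMap pvGetPriorityA x _ (by decide) (getPriority_mem x)
        (fun p => us.filter (fun u => pvGetPriorityA u == p))
        (fun p _ u hu => by simpa using (List.of_mem_filter hu))]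
    apply List.flatMap_congr
    intro p _
    by_cases h : pvGetPriorityA x = p <;> simp [h]

theorem prioritize_crawling_urls_spec : Claim_equal_prioritize_crawling_urls := by
  intro urls _
  unfold Spec_prioritize_crawling_urls prioritize_crawling_urls prioritize_crawling_urls_alt
  rw [sorted_eq_flatMap, PySem.List.foldl_append_eq_flatMap]
  simp [bucket_eq]
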